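-- pv_equiv track=rewrite | github.com/nakamotoo/Python_Homework | 第二回/Q10.py | express_gap
-- ===== SOURCE A (Python) =====
-- def express_gap(local, express):
--     num = 0
--     gap = []
--     for i in range(len(local)):
--         if i == 0:
--             #始発駅はnumをappendしない
--             continue
--         elif local[i] not in express:
--             num += 1
--         elif local[i] in express:
--             gap.append(num)
--             num = 0
--     return gap
-- ===== SOURCE B (Python) =====
-- def express_gap(local, express):
--     pos = [i for i in range(1, len(local)) if local[i] in express]
--     gap = []
--     prev = 0
--     for p in pos:
--         gap.append(p - prev - 1)
--         prev = p
--     return gap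
-- ===== Notes on version B (the rewrite author's own statement) =====
-- stated objective: alternative
-- what changed: Instead of a per-stop running counter reset at each express stop, B first builds the list of express-stop indices and then emits the arithmetic differences between consecutive indices (minus one), with virtual previous position 0.
import Mathlib
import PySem

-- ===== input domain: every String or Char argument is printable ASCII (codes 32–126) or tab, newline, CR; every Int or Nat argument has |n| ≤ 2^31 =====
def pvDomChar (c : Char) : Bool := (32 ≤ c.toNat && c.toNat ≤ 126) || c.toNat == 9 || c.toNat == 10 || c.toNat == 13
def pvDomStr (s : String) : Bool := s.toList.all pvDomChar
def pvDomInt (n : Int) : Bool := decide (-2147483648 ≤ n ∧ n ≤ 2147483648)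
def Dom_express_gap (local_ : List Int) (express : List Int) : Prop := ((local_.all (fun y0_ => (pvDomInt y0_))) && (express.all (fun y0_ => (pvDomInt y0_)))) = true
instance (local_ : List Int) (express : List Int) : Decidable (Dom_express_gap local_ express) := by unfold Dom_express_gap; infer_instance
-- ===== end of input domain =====

-- B replaces A's per-stop running counter with an index list of express stops
-- and arithmetic differences between consecutive indices (alternative decomposition).
-- ===== PORT A =====
def express_gap (local_ : List Int) (express : List Int) : List Int :=
  ((List.range local_.length).foldl (fun (st : Int × List Int) i =>
      if i = 0 then st
      else if local_.getD i 0 ∉ express then (st.1 + 1, st.2)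
      else if local_.getD i 0 ∈ express then (0, st.2 ++ [st.1])
      else st) ((0 : Int), ([] : List Int))).2

-- ===== PORT B =====
def express_gap_alt (local_ : List Int) (express : List Int) : List Int :=
  let pos := (List.range' 1 (local_.length - 1)).filter (fun i => local_.getD i 0 ∈ express)
  (pos.foldl (fun (st : Nat × List Int) p => (p, st.2 ++ [(p : Int) - (st.1 : Int) - 1]))
    ((0 : Nat), ([] : List Int))).2

-- ===== PRECONDITION & SPEC =====
def Spec_express_gap (local_ : List Int) (express : List Int) (out : List Int) : Prop := out = express_gap_alt local_ express
instance (local_ : List Int) (express : List Int) (out : List Int) : Decidable (Spec_express_gap local_ express out) := by unfold Spec_express_gap; infer_instance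

-- ===== CLAIM (what is proved, stated in full; the proofs are below) =====
def Claim_equal_express_gap : Prop := ∀ (local_ : List Int) (express : List Int), Dom_express_gap local_ express → Spec_express_gap local_ express (express_gap local_ express)

-- ===== LEMMAS AND PROOFS =====

-- A's loop and B's fold as functions of the number of processed indices
def egA (local_ express : List Int) (m : Nat) : Int × List Int :=
  (List.range m).foldl (fun (st : Int × List Int) i =>
      if i = 0 then st
      else if local_.getD i 0 ∉ express then (st.1 + 1, st.2)
      else if local_.getD i 0 ∈ express then (0, st.2 ++ [st.1])
      else st) ((0 : Int), ([] : List Int))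

def egB (local_ express : List Int) (m : Nat) : Nat × List Int :=
  (((List.range' 1 (m - 1)).filter (fun i => local_.getD i 0 ∈ express)).foldl
    (fun (st : Nat × List Int) p => (p, st.2 ++ [(p : Int) - (st.1 : Int) - 1]))
    ((0 : Nat), ([] : List Int)))

theorem egA_succ (local_ express : List Int) (k : Nat) (hk : k ≠ 0) :
    egA local_ express (k + 1) =
      if local_.getD k 0 ∈ express then
        (0, (egA local_ express k).2 ++ [(egA local_ express k).1])
      else ((egA local_ express k).1 + 1, (egA local_ express k).2) := by
  unfold egA
  rw [List.range_succ, List.foldl_append]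
  by_cases hmem : local_.getD k 0 ∈ express <;>
    simp only [List.foldl_cons, List.foldl_nil, hk, if_false, hmem, if_true,
      not_true_eq_false, not_false_eq_true, if_false, if_true]

theorem range'_one_concat (k : Nat) (hk : 1 ≤ k) :
    List.range' 1 ((k + 1) - 1) = List.range' 1 (k - 1) ++ [k] := by
  obtain ⟨j, rfl⟩ := Nat.exists_eq_add_of_le hk
  have h := List.range'_concat (s := 1) (n := j) (step := 1)
  simp only [Nat.one_mul] at h
  rw [show 1 + j + 1 - 1 = j + 1 by omega, show 1 + j - 1 = j by omega, h]

theorem egB_succ (local_ express : List Int) (k : Nat) (hk : 1 ≤ k) :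
    egB local_ express (k + 1) =
      if local_.getD k 0 ∈ express then
        (k, (egB local_ express k).2 ++
          [(k : Int) - ((egB local_ express k).1 : Int) - 1])
      else egB local_ express k := by
  unfold egB
  rw [range'_one_concat k hk, List.filter_append, List.foldl_append]
  by_cases hmem : local_.getD k 0 ∈ express
  · rw [if_pos hmem]
    simp only [List.filter_cons, List.filter_nil, hmem, decide_true, if_true,
      List.foldl_cons, List.foldl_nil]
  · rw [if_neg hmem]
    simp only [List.filter_cons, List.filter_nil, hmem, decide_false,
      Bool.false_eq_true, if_false, List.foldl_nil]

-- Invariant: gap lists agree, and A's running counter equals (m-1) - prev of B.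
theorem eg_inv (local_ express : List Int) (m : Nat) :
    (egA local_ express m).2 = (egB local_ express m).2 ∧
    (1 ≤ m → (egA local_ express m).1 = (m : Int) - 1 - ((egB local_ express m).1 : Int)) := by
  induction m with
  | zero => simp [egA, egB]
  | succ k ih =>
    rcases Nat.eq_zero_or_pos k with hk | hk
    · subst hk
      constructor
      · simp [egA, egB, List.range_succ]
      · intro _
        simp [egA, egB, List.range_succ]
    · obtain ⟨h2, h1⟩ := ih
      have h1 := h1 hk
      rw [egA_succ local_ express k (by omega), egB_succ local_ express k hk]
      by_cases hmem : local_.getD k 0 ∈ express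
      · rw [if_pos hmem, if_pos hmem]
        constructor
        · show (egA local_ express k).2 ++ [(egA local_ express k).1] =
            (egB local_ express k).2 ++ [(k : Int) - ((egB local_ express k).1 : Int) - 1]
          rw [h2, h1, show (k : Int) - 1 - ((egB local_ express k).1 : Int) =
            (k : Int) - ((egB local_ express k).1 : Int) - 1 from by ring]
        · intro _
          show (0 : Int) = (k : Int) + 1 - 1 - (k : Int)
          ring
      · rw [if_neg hmem, if_neg hmem]
        refine ⟨h2, fun _ => ?_⟩
        rw [h1]
        push_cast
        ring

-- ===== VERDICT (by name: the statement is the Claim_ definition above) =====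
theorem express_gap_spec : Claim_equal_express_gap := by
  intro local_ express _
  unfold Spec_express_gap express_gap express_gap_alt
  exact (eg_inv local_ express local_.length).1
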